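-- pv_equiv track=rewrite | github.com/kimhono97/jym_m | crawling_qt.py | getContext_1
-- ===== SOURCE A (Python) =====
-- def getContext_1(ori):
--     l = []
--     b = 0
--
--     ori = ori[1:]
--     for i in ori:
--         i = str(i)
--         a = i.find('>')
--         i = i[a+1:]
--         a = i.find('<')
--         if b%2 == 0:
--             i = i[:a]
--             tmp = i
--         else:
--             i = i[:a-2]
--             l.append([tmp, i])
--         b += 1
--
--     return l
-- ===== SOURCE B (Python) =====
-- def getContext_1(ori):
--     # Staged passes: stride-slice the odd and even positions, strip each
--     # after its first '>', then zip the two columns into pairs.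
--     heads = [s[s.find('>')+1:] for s in ori[1::2]]
--     tails = [s[s.find('>')+1:] for s in ori[2::2]]
--     return [[h[:h.find('<')], t[:t.find('<')-2]] for h, t in zip(heads, tails)]
-- ===== Notes on version B (the rewrite author's own statement) =====
-- stated objective: alternative
-- what changed: Replaces A's stateful single pass (parity flag b%2 plus a tmp carry) by staged passes: stride slices ori[1::2]/ori[2::2], two independent map passes stripping after the first '>', and one final zip that assembles the pairs.
import Mathlib
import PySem

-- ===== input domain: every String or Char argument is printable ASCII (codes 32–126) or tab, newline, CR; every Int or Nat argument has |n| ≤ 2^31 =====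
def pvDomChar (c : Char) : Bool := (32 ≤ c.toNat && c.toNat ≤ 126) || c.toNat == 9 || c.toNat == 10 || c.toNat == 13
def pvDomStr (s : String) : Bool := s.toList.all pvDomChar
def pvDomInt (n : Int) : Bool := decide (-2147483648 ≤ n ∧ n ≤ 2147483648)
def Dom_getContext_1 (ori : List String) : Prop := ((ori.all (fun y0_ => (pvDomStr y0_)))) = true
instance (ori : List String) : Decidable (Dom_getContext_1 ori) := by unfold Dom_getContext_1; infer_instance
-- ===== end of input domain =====

-- A: stateful single pass over ori[1:] with a parity flag b and a tmp carry.
-- B: staged passes — stride slices ori[1::2]/ori[2::2], two map passes stripping after '>', one zip (alternative decomposition; return values proved equal).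

-- ===== PORT A =====
def pvStepA (st : List (List String) × Int × String) (i : String) :
    List (List String) × Int × String :=
  let a := PySem.Str.find i ">"
  let i := PySem.Str.slice i (some (a + 1)) none
  let a := PySem.Str.find i "<"
  if PySem.Int.mod st.2.1 2 = 0 then
    (st.1, st.2.1 + 1, PySem.Str.slice i none (some a))
  else
    (st.1 ++ [[st.2.2, PySem.Str.slice i none (some (a - 2))]], st.2.1 + 1, st.2.2)

def getContext_1 (ori : List String) : List (List String) :=
  -- tmp starts undefined in Python; it is never read before the first (even) step sets it
  ((PySem.List.slice ori (some 1) none).foldl pvStepA ([], 0, "")).1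

-- ===== PORT B =====
-- strip everything up to and including the first '>' (shared by both comprehensions in Source B)
def pvStrip (s : String) : String :=
  PySem.Str.slice s (some (PySem.Str.find s ">" + 1)) none

def getContext_1_alt (ori : List String) : List (List String) :=
  -- ori[1::2] / ori[2::2]: step 2 ≠ 0, so slice? is always `some`; getD [] only discharges the Option
  let heads := ((PySem.List.slice? ori (some 1) none 2).getD []).map pvStrip
  let tails := ((PySem.List.slice? ori (some 2) none 2).getD []).map pvStrip
  (heads.zip tails).map (fun p =>
    [PySem.Str.slice p.1 none (some (PySem.Str.find p.1 "<")),
     PySem.Str.slice p.2 none (some (PySem.Str.find p.2 "<" - 2))])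

-- ===== PRECONDITION & SPEC =====
def Spec_getContext_1 (ori : List String) (out : List (List String)) : Prop := out = getContext_1_alt ori
instance (ori : List String) (out : List (List String)) : Decidable (Spec_getContext_1 ori out) := by unfold Spec_getContext_1; infer_instance

-- ===== CLAIM (what is proved, stated in full; the proofs are below) =====
def Claim_equal_getContext_1 : Prop := ∀ (ori : List String), Dom_getContext_1 ori → Spec_getContext_1 ori (getContext_1 ori)

-- ===== LEMMAS AND PROOFS =====

-- elements at odd indices 1,3,5,… (what ori[1::2] selects)
def pvOdds {α : Type} : List α → List α
  | _ :: y :: r => y :: pvOdds r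
  | _ => []

-- elements at even indices 0,2,4,…
def pvEvens {α : Type} : List α → List α
  | x :: _ :: r => x :: pvEvens r
  | [x] => [x]
  | [] => []

-- the pairwise shape both sides reduce to
def pvPairs : List String → List (List String)
  | x :: y :: rest =>
      [PySem.Str.slice (pvStrip x) none (some (PySem.Str.find (pvStrip x) "<")),
       PySem.Str.slice (pvStrip y) none (some (PySem.Str.find (pvStrip y) "<" - 2))] :: pvPairs rest
  | _ => []

theorem pvAux_filterMap_odds {α : Type} (t : List α) :
    (List.range (t.length / 2)).filterMap (fun k => t[1 + 2 * k]?) = pvOdds t := by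
  induction t using pvOdds.induct with
  | case1 x y r ih =>
    have h : (x :: y :: r).length / 2 = r.length / 2 + 1 := by simp; omega
    rw [h, List.range_succ_eq_map, List.filterMap_cons, List.filterMap_map]
    simp only [List.getElem?_cons_succ, List.getElem?_cons_zero, Function.comp]
    rw [show (fun k => (x :: y :: r)[1 + 2 * (k + 1)]?) = (fun k => r[1 + 2 * k]?) from by
      funext k
      rw [show 1 + 2 * (k + 1) = (1 + 2 * k) + 1 + 1 by omega]
      simp]
    rw [ih]
    rfl
  | case2 t h =>
    rcases t with _ | ⟨x, _ | ⟨y, r⟩⟩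
    · simp [pvOdds]
    · simp [pvOdds]
    · exact (h x y r rfl).elim

theorem pvSliceOne {α : Type} (xs : List α) :
    PySem.List.slice? xs (some 1) none 2 = some (pvOdds xs) := by
  rcases xs with _ | ⟨x, t⟩
  · rfl
  · simp only [PySem.List.slice?, PySem.List.sliceIndices]
    norm_num
    have h1 : ∀ k : Nat, ((1 : Int) + 2 * (k : Int)).toNat = 1 + 2 * k := by intro k; omega
    simp only [h1]
    have h2 : (if 0 < t.length then (((t.length : Int) + 2 - 1) / 2).toNat else 0)
        = (x :: t).length / 2 := by
      split_ifs with h <;> simp <;> omega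
    rw [h2]
    exact pvAux_filterMap_odds (x :: t)

theorem pvSliceTwo {α : Type} (xs : List α) :
    PySem.List.slice? xs (some 2) none 2 = some (pvOdds xs.tail) := by
  rcases xs with _ | ⟨x, _ | ⟨y, r⟩⟩
  · rfl
  · rfl
  · simp only [PySem.List.slice?, PySem.List.sliceIndices]
    norm_num
    rw [show min (2 : Int) ((r.length : Int) + 1 + 1) = 2 from by omega]
    have h1 : ∀ k : Nat, ((2 : Int) + 2 * (k : Int)).toNat = (1 + 2 * k) + 1 := by
      intro k; omega
    simp only [h1, List.getElem?_cons_succ]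
    have h2 : (if (2 : Int) ≤ (r.length : Int) + 1 then (((r.length : Int) + 1 + 1 - 2 + 2 - 1) / 2).toNat else 0)
        = (y :: r).length / 2 := by
      split_ifs with h <;> simp <;> omega
    rw [h2]
    exact pvAux_filterMap_odds (y :: r)

theorem pvOdds_cons {α : Type} (x : α) (t : List α) : pvOdds (x :: t) = pvEvens t := by
  induction t using pvEvens.induct generalizing x with
  | case1 a b r ih => simp [pvOdds, pvEvens, ih]
  | case2 a => rfl
  | case3 => rfl

theorem pvZip_pairs (t : List String) :
    (((pvEvens t).map pvStrip).zip ((pvOdds t).map pvStrip)).map (fun p =>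
      [PySem.Str.slice p.1 none (some (PySem.Str.find p.1 "<")),
       PySem.Str.slice p.2 none (some (PySem.Str.find p.2 "<" - 2))]) = pvPairs t := by
  induction t using pvPairs.induct with
  | case1 x y rest ih =>
    simp only [pvEvens, pvOdds, List.map_cons, List.zip_cons_cons, pvPairs]
    rw [ih]
  | case2 t h =>
    rcases t with _ | ⟨x, _ | ⟨y, r⟩⟩
    · rfl
    · rfl
    · exact (h x y r rfl).elim

theorem pvFold_eq (xs : List String) :
    ∀ (l : List (List String)) (b : Int) (tmp : String), (2 : Int) ∣ b →
      (xs.foldl pvStepA (l, b, tmp)).1 = l ++ pvPairs xs := by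
  induction xs using pvPairs.induct with
  | case1 x y rest ih =>
    intro l b tmp hb
    have hb1 : ¬ (2 : Int) ∣ (b + 1) := by omega
    have hb2 : (2 : Int) ∣ (b + 1 + 1) := by omega
    simp only [List.foldl_cons]
    rw [show pvStepA (pvStepA (l, b, tmp) x) y =
        (l ++ [[PySem.Str.slice (pvStrip x) none (some (PySem.Str.find (pvStrip x) "<")),
                PySem.Str.slice (pvStrip y) none (some (PySem.Str.find (pvStrip y) "<" - 2))]],
         b + 1 + 1, PySem.Str.slice (pvStrip x) none (some (PySem.Str.find (pvStrip x) "<"))) from by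
      simp [pvStepA, pvStrip, hb, hb1]]
    rw [ih _ _ _ hb2, pvPairs]
    simp
  | case2 xs h =>
    intro l b tmp hb
    rcases xs with _ | ⟨x, _ | ⟨y, rest⟩⟩
    · simp [pvPairs]
    · simp [pvPairs, pvStepA, hb]
    · exact (h x y rest rfl).elim

-- ===== VERDICT (by name: the statement is the Claim_ definition above) =====
theorem getContext_1_spec : Claim_equal_getContext_1 := by
  intro ori _
  unfold Spec_getContext_1 getContext_1 getContext_1_alt
  rw [pvFold_eq _ [] 0 "" (by decide), pvSliceOne, pvSliceTwo]
  rcases ori with _ | ⟨x, t⟩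
  · rfl
  · simp only [List.nil_append, Option.getD_some, List.tail_cons,
      PySem.List.slice_from_one, pvOdds_cons]
    exact (pvZip_pairs t).symm
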